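-- pv_equiv track=rewrite | github.com/EkaterinaZaitcev/HomeWork_10.1 | src/filter.py | count_operations_by_category
-- ===== SOURCE A (Python) =====
-- from collections import Counter
--
-- def count_operations_by_category(list_filter: list, list_category: list) -> dict:
--     """Функция фильтрует список по категориям и возвращает количество операция по категориям"""
--     new_list = []
--     for i in list_filter:
--         if "description" in i:
--             if i["description"] in list_category:
--                 new_list.append(i["description"])
--     counted = Counter(new_list)
--     return counted
-- ===== SOURCE B (Python) =====
-- from collections import Counter
--
-- def count_operations_by_category(list_filter: list, list_category: list) -> dict:
--     """Count every description first, then keep only the allowed categories."""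
--     totals = Counter()
--     for item in list_filter:
--         if "description" in item:
--             totals[item["description"]] += 1
--     allowed = set(list_category)
--     result = Counter()
--     for desc, n in totals.items():
--         if desc in allowed:
--             result[desc] = n
--     return result
-- ===== Notes on version B (the rewrite author's own statement) =====
-- stated objective: alternative
-- what changed: B counts every description in one pass first and then filters the resulting counting table by the allowed categories, instead of A's building a filtered list and counting it afterwards.
import Mathlib
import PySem

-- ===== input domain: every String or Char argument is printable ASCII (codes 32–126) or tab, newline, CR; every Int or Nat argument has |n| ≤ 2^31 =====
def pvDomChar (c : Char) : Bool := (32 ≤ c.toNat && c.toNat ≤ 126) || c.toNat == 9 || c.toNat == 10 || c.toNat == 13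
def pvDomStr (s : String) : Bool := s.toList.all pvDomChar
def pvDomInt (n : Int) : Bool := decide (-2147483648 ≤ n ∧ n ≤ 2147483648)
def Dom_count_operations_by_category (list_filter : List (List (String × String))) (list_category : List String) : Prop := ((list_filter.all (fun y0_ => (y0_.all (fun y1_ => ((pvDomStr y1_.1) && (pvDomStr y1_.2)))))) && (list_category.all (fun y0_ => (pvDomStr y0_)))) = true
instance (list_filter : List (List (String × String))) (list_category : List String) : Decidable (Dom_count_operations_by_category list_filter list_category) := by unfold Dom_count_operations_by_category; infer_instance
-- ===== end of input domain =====

-- B counts all descriptions in one pass, then filters the counting table by the allowed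
-- categories, instead of A's filter-the-list-then-count; objective: alternative decomposition.


-- ===== PORT A =====
-- for i in list_filter: if "description" in i: if i["description"] in list_category: append; then Counter
def count_operations_by_category (list_filter : List (List (String × String))) (list_category : List String) : List (String × Int) :=
  let new_list : List String := list_filter.foldl (fun acc i =>
    let d := PySem.Dict.mk i
    if d.contains "description" then
      match d.get? "description" with          -- guarded by the contains check, never none there
      | some v => if list_category.contains v then acc ++ [v] else acc
      | none => acc
    else acc) []
  (PySem.Dict.counter new_list).items

-- ===== PORT B =====
-- one pass counting every description, then keep only the allowed categories from the table
def count_operations_by_category_alt (list_filter : List (List (String × String))) (list_category : List String) : List (String × Int) :=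
  let totals : PySem.Dict String Int := list_filter.foldl (fun c i =>
    let d := PySem.Dict.mk i
    if d.contains "description" then
      match d.get? "description" with          -- guarded by the contains check, never none there
      | some v => c.modify v 0 (· + 1)
      | none => c
    else c) PySem.Dict.empty
  let allowed : PySem.Set String := PySem.Set.ofList list_category
  let result : PySem.Dict String Int := totals.items.foldl (fun r p =>
    if allowed.contains p.1 then r.insert p.1 p.2 else r) PySem.Dict.empty
  result.items

-- ===== PRECONDITION & SPEC =====
def Spec_count_operations_by_category (list_filter : List (List (String × String))) (list_category : List String) (out : List (String × Int)) : Prop := out = count_operations_by_category_alt list_filter list_category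
instance (list_filter : List (List (String × String))) (list_category : List String) (out : List (String × Int)) : Decidable (Spec_count_operations_by_category list_filter list_category out) := by unfold Spec_count_operations_by_category; infer_instance

-- ===== CLAIM (what is proved, stated in full; the proofs are below) =====
def Claim_equal_count_operations_by_category : Prop := ∀ (list_filter : List (List (String × String))) (list_category : List String), Dom_count_operations_by_category list_filter list_category → Spec_count_operations_by_category list_filter list_category (count_operations_by_category list_filter list_category)

-- ===== LEMMAS AND PROOFS =====

-- the description of one item, if any
def pvDesc? (i : List (String × String)) : Option String := (PySem.Dict.mk i).get? "description"

-- all descriptions of the list, in order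
def pvDescs (list_filter : List (List (String × String))) : List String := list_filter.filterMap pvDesc?

-- A's loop builds exactly the filtered description list
lemma pvFoldA (list_filter : List (List (String × String))) (list_category : List String) (acc : List String) :
    list_filter.foldl (fun acc i =>
      let d := PySem.Dict.mk i
      if d.contains "description" then
        match d.get? "description" with
        | some v => if list_category.contains v then acc ++ [v] else acc
        | none => acc
      else acc) acc
    = acc ++ (pvDescs list_filter).filter (fun v => list_category.contains v) := by
  induction list_filter generalizing acc with
  | nil => simp [pvDescs]
  | cons i t ih =>
    rw [List.foldl_cons]
    cases h : (PySem.Dict.mk i).get? "description" with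
    | none =>
      have hc : (PySem.Dict.mk i).contains "description" = false := by
        rw [PySem.Dict.contains_eq_isSome_get?, h]; rfl
      have hstep : (let d := PySem.Dict.mk i
          if d.contains "description" then
            match d.get? "description" with
            | some v => if list_category.contains v then acc ++ [v] else acc
            | none => acc
          else acc) = acc := by
        simp only [hc, Bool.false_eq_true, if_false]
      have hd : pvDescs (i :: t) = pvDescs t := by
        simp [pvDescs, pvDesc?, h]
      rw [hstep, ih, hd]
    | some v =>
      have hc : (PySem.Dict.mk i).contains "description" = true := by
        rw [PySem.Dict.contains_eq_isSome_get?, h]; rfl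
      have hstep : (let d := PySem.Dict.mk i
          if d.contains "description" then
            match d.get? "description" with
            | some v => if list_category.contains v then acc ++ [v] else acc
            | none => acc
          else acc) = if list_category.contains v then acc ++ [v] else acc := by
        simp only [hc, if_true, h]
      have hd : pvDescs (i :: t) = v :: pvDescs t := by
        simp [pvDescs, pvDesc?, h]
      rw [hstep, hd, List.filter_cons]
      by_cases hv : list_category.contains v
      · rw [if_pos hv, if_pos hv, ih, List.append_assoc, List.singleton_append]
      · rw [if_neg hv, if_neg hv, ih]

-- B's first loop is Counter on the full description list
lemma pvFoldB (list_filter : List (List (String × String))) (c : PySem.Dict String Int) :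
    list_filter.foldl (fun c i =>
      let d := PySem.Dict.mk i
      if d.contains "description" then
        match d.get? "description" with
        | some v => c.modify v 0 (· + 1)
        | none => c
      else c) c
    = (pvDescs list_filter).foldl (fun c v => c.modify v 0 (· + 1)) c := by
  induction list_filter generalizing c with
  | nil => simp [pvDescs]
  | cons i t ih =>
    rw [List.foldl_cons]
    cases h : (PySem.Dict.mk i).get? "description" with
    | none =>
      have hc : (PySem.Dict.mk i).contains "description" = false := by
        rw [PySem.Dict.contains_eq_isSome_get?, h]; rfl
      have hstep : (let d := PySem.Dict.mk i
          if d.contains "description" then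
            match d.get? "description" with
            | some v => c.modify v 0 (· + 1)
            | none => c
          else c) = c := by
        simp only [hc, Bool.false_eq_true, if_false]
      rw [hstep, ih]
      have : pvDescs (i :: t) = pvDescs t := by
        simp [pvDescs, pvDesc?, h]
      rw [this]
    | some v =>
      have hc : (PySem.Dict.mk i).contains "description" = true := by
        rw [PySem.Dict.contains_eq_isSome_get?, h]; rfl
      have hstep : (let d := PySem.Dict.mk i
          if d.contains "description" then
            match d.get? "description" with
            | some v => c.modify v 0 (· + 1)
            | none => c
          else c) = c.modify v 0 (· + 1) := by
        simp only [hc, if_true, h]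
      rw [hstep, ih]
      have : pvDescs (i :: t) = v :: pvDescs t := by
        simp [pvDescs, pvDesc?, h]
      rw [this, List.foldl_cons]

-- set(...) commutes with filtering the underlying list
lemma pvOfList_filter (xs : List String) (p : String → Bool) :
    PySem.Set.ofList (xs.filter p) = (PySem.Set.ofList xs).filter p := by
  induction xs with
  | nil => simp [PySem.Set.ofList_nil]
  | cons x t ih =>
    by_cases hx : p x
    · rw [List.filter_cons_of_pos hx, PySem.Set.ofList_cons, PySem.Set.ofList_cons, ih]
      simp only [PySem.Set.discard, List.filter_filter, List.filter_cons_of_pos hx]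
      congr 1
      exact List.filter_congr (fun a _ => by rw [Bool.and_comm])
    · rw [List.filter_cons_of_neg hx, PySem.Set.ofList_cons, ih,
        List.filter_cons_of_neg hx]
      simp only [PySem.Set.discard, List.filter_filter]
      refine (List.filter_congr (fun a _ => ?_)).symm
      by_cases hax : a == x
      · have : a = x := by simpa using hax
        simp [this, hx]
      · simp [hax]

-- membership test on set(list_category) is the list's membership test
lemma pvContains_ofList (lc : List String) (x : String) :
    (PySem.Set.ofList lc).contains x = lc.contains x := by
  by_cases hx : x ∈ lc <;> simp [hx, PySem.Set.contains_eq_listContains, PySem.Set.mem_ofList]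

-- ===== VERDICT (by name: the statement is the Claim_ definition above) =====
theorem count_operations_by_category_spec : Claim_equal_count_operations_by_category := by
  intro list_filter list_category _
  unfold Spec_count_operations_by_category
  unfold count_operations_by_category count_operations_by_category_alt
  simp only [pvFoldA, pvFoldB, List.nil_append]
  rw [← PySem.Dict.counter_eq_foldl]
  rw [PySem.Dict.items_counter, PySem.Dict.items_counter]
  rw [← List.foldl_filter]
  rw [List.filter_map (f := fun k => (k, ((pvDescs list_filter).count k : Int)))]
  simp only [Function.comp_def, pvContains_ofList]
  rw [← pvOfList_filter]
  rw [PySem.Dict.items_foldl_insert_fresh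
      (k := Prod.fst) (v := Prod.snd) (d := PySem.Dict.empty)
      (l := (PySem.Set.ofList ((pvDescs list_filter).filter (fun v => list_category.contains v))).map
        (fun k => (k, ((pvDescs list_filter).count k : Int))))
      (fun a _ => PySem.Dict.contains_empty _)
      (by
        rw [List.map_map]
        have : (Prod.fst ∘ fun k => (k, ((pvDescs list_filter).count k : Int))) = id := rfl
        rw [this, List.map_id]
        exact PySem.Set.nodup_ofList _)]
  simp only [show (PySem.Dict.empty : PySem.Dict String Int).items = [] from rfl, List.nil_append]
  rw [List.map_map]
  refine List.map_congr_left (fun k hk => ?_)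
  have hk' : k ∈ (pvDescs list_filter).filter (fun v => list_category.contains v) :=
    (PySem.Set.mem_ofList _ _).mp hk
  have hp : (fun v => list_category.contains v) k = true := (List.mem_filter.mp hk').2
  simp only [Function.comp_def]
  rw [List.count_filter hp]
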